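-- pv_equiv track=rewrite | github.com/tjdgus3160/algorithm | 프로그래머스/Level3/최고의 집합.py | solution
-- ===== SOURCE A (Python) =====
-- def solution(n, s):
--     a,b=divmod(s,n)
--     if a<1:
--         return [-1]
--     res=[a]*n
--     for i in range(n-1,-1,-1):
--         if b>0:
--             res[i]+=1
--             b-=1
--         else:
--             break
--     return res
-- ===== SOURCE B (Python) =====
-- def solution(n, s):
--     if s // n < 1:
--         return [-1]
--     res = []
--     while n > 0:
--         q = s // n
--         res.append(q)
--         s -= q
--         n -= 1
--     return res
-- ===== Notes on version B (the rewrite author's own statement) =====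
-- stated objective: alternative
-- what changed: Instead of computing divmod(s,n) once and bumping the last b slots of [a]*n in a reverse loop, B builds the list greedily front-to-back: each step appends s//n, subtracts it from s and decrements n, which distributes the remainder to the tail automatically.
import Mathlib
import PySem

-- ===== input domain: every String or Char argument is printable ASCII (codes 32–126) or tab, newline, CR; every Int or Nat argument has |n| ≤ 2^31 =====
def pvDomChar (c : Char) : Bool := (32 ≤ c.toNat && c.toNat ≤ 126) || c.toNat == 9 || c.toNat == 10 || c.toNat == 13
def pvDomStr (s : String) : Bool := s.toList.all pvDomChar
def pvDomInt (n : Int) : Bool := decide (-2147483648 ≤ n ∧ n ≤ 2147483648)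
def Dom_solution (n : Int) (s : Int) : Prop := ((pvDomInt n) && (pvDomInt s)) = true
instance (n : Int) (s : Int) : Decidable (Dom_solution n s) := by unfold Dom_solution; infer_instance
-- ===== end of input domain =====

-- B replaces A's divmod + reverse bump loop by a greedy loop that emits s // n, subtracts it
-- and decrements n each step (alternative algorithm); equal on all n ≠ 0.

-- ===== PORT A =====
-- the for-loop with break: indices come from range(n-1,-1,-1); res[i] += 1 is always in range
-- (indices 0..n-1 on a list of length n), so pyGetD/pySetD are exact here
def solLoopA (idxs : List Int) (res : List Int) (b : Int) : List Int :=
  match idxs with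
  | [] => res
  | i :: rest =>
    if b > 0 then
      solLoopA rest (PySem.List.pySetD res i (PySem.List.pyGetD res i 0 + 1)) (b - 1)
    else res

def solution (n : Int) (s : Int) : List Int :=
  match PySem.Int.divmod? s n with
  | none => []  -- n = 0: Python raises ZeroDivisionError; excluded by Pre_solution
  | some (a, b) =>
    if a < 1 then [-1]
    else solLoopA (PySem.List.pyRange (n - 1) (-1) (-1)) (List.replicate n.toNat a) b

-- ===== PORT B =====
-- the while loop: while n > 0: q = s // n; res.append(q); s -= q; n -= 1
def solLoopB (n : Int) (s : Int) (acc : List Int) : List Int :=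
  if 0 < n then
    solLoopB (n - 1) (s - PySem.Int.floordiv s n) (acc ++ [PySem.Int.floordiv s n])
  else acc
termination_by n.toNat
decreasing_by omega

def solution_alt (n : Int) (s : Int) : List Int :=
  match PySem.Int.floordiv? s n with
  | none => []  -- n = 0: s // n raises, excluded by Pre_solution
  | some q0 =>
    if q0 < 1 then [-1]
    else solLoopB n s []

-- ===== PRECONDITION & SPEC =====
-- Pre_ excludes only n = 0, where both Pythons raise ZeroDivisionError.
def Pre_solution (n : Int) (s : Int) : Prop := n ≠ 0
instance (n : Int) (s : Int) : Decidable (Pre_solution n s) := by unfold Pre_solution; infer_instance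
def pvWitness_solution : Int × Int := (3, 11)

def Spec_solution (n : Int) (s : Int) (out : List Int) : Prop := out = solution_alt n s
instance (n : Int) (s : Int) (out : List Int) : Decidable (Spec_solution n s out) := by unfold Spec_solution; infer_instance

-- ===== CLAIM (what is proved, stated in full; the proofs are below) =====
def Claim_equal_solution : Prop := ∀ (n : Int) (s : Int), Dom_solution n s → Pre_solution n s → Spec_solution n s (solution n s)

-- ===== LEMMAS AND PROOFS =====

-- A's loop over [k-1, …, 0] on replicate k a ++ tail bumps the last b of the replicate part
lemma solLoopA_replicate (a : Int) (b k : Nat) (tail : List Int) (hb : b ≤ k) :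
    solLoopA (PySem.List.pyRange ((k : Int) - 1) (-1) (-1)) (List.replicate k a ++ tail) (b : Int)
      = List.replicate (k - b) a ++ List.replicate b (a + 1) ++ tail := by
  induction b generalizing k tail with
  | zero =>
    cases PySem.List.pyRange ((k : Int) - 1) (-1) (-1) with
    | nil => simp [solLoopA]
    | cons i rest => simp [solLoopA]
  | succ m ih =>
    obtain ⟨k', rfl⟩ : ∃ k', k = k' + 1 := ⟨k - 1, by omega⟩
    rw [PySem.List.pyRange_neg_one_cons (by push_cast; omega)]
    simp only [solLoopA]
    rw [if_pos (show ((m + 1 : Nat) : Int) > 0 by push_cast; omega)]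
    have hk1 : ((k' + 1 : Nat) : Int) - 1 = ((k' : Nat) : Int) := by push_cast; omega
    rw [hk1, show ((m + 1 : Nat) : Int) - 1 = ((m : Nat) : Int) by push_cast; omega]
    have hget : PySem.List.pyGetD (List.replicate (k' + 1) a ++ tail) ((k' : Nat) : Int) 0 = a := by
      rw [PySem.List.pyGetD_natCast]
      rw [List.getD_eq_getElem _ _ (by simp; omega)]
      rw [List.getElem_append_left (by simp)]
      simp
    have hset : PySem.List.pySetD (List.replicate (k' + 1) a ++ tail) ((k' : Nat) : Int) (a + 1)
        = List.replicate k' a ++ ((a + 1) :: tail) := by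
      rw [PySem.List.pySetD_natCast]
      rw [show List.replicate (k' + 1) a = List.replicate k' a ++ [a] from List.replicate_succ' ..]
      rw [List.append_assoc]
      rw [List.set_append_right _ _ (by simp)]
      simp
    rw [hget, hset]
    rw [ih k' ((a + 1) :: tail) (by omega)]
    rw [show k' - m = k' + 1 - (m + 1) by omega]
    simp [List.replicate_succ', List.append_assoc]

-- B's loop on an exact multiple emits k copies of a
lemma solLoopB_mul (k : Nat) (a : Int) (acc : List Int) :
    solLoopB (k : Int) (a * k) acc = acc ++ List.replicate k a := by
  induction k generalizing acc with
  | zero => rw [solLoopB]; simp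
  | succ m ih =>
    rw [solLoopB, if_pos (by push_cast; omega)]
    have hq : PySem.Int.floordiv (a * ((m + 1 : Nat) : Int)) ((m + 1 : Nat) : Int) = a := by
      rw [PySem.Int.floordiv_eq_ediv_of_pos (by push_cast; omega)]
      exact Int.mul_ediv_cancel a (by push_cast; omega)
    rw [hq, show ((m + 1 : Nat) : Int) - 1 = ((m : Nat) : Int) by push_cast; omega,
        show a * ((m + 1 : Nat) : Int) - a = a * ((m : Nat) : Int) by push_cast; ring]
    rw [ih]
    simp [List.replicate_succ]

-- B's loop on a*k + b with 0 ≤ b < k emits k-b copies of a then b copies of a+1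
lemma solLoopB_rem (k : Nat) (a b : Int) (hb0 : 0 ≤ b) (hbk : b < (k : Int)) (acc : List Int) :
    solLoopB (k : Int) (a * k + b) acc
      = acc ++ List.replicate ((k : Int) - b).toNat a ++ List.replicate b.toNat (a + 1) := by
  induction k generalizing acc with
  | zero => omega
  | succ m ih =>
    rw [solLoopB, if_pos (by push_cast; omega)]
    have hq : PySem.Int.floordiv (a * ((m + 1 : Nat) : Int) + b) ((m + 1 : Nat) : Int) = a := by
      rw [PySem.Int.floordiv_eq_iff_of_pos (by push_cast; omega)]
      constructor <;> [nlinarith; nlinarith]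
    rw [hq, show ((m + 1 : Nat) : Int) - 1 = ((m : Nat) : Int) by push_cast; omega,
        show a * ((m + 1 : Nat) : Int) + b - a = a * ((m : Nat) : Int) + b by push_cast; ring]
    by_cases hbm : b < (m : Int)
    · rw [ih hbm]
      have h1 : (((m + 1 : Nat) : Int) - b).toNat = (((m : Nat) : Int) - b).toNat + 1 := by
        push_cast; omega
      rw [h1]
      simp [List.replicate_succ, List.append_assoc]
    · -- b = m: remainder equals the remaining count, rest is an exact multiple of a+1
      have hbm' : b = (m : Int) := by omega
      have hs : a * ((m : Nat) : Int) + b = (a + 1) * ((m : Nat) : Int) := by rw [hbm']; ring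
      rw [hs, solLoopB_mul]
      have h1 : (((m + 1 : Nat) : Int) - b).toNat = 1 := by push_cast; omega
      have h2 : b.toNat = m := by omega
      rw [h1, h2]
      simp

lemma solution_eq_alt (n s : Int) (hn : n ≠ 0) : solution n s = solution_alt n s := by
  unfold solution solution_alt
  rw [show PySem.Int.divmod? s n = some (PySem.Int.floordiv s n, PySem.Int.mod s n) by
    simp [PySem.Int.divmod?, PySem.Int.floordiv, PySem.Int.mod, hn]]
  rw [show PySem.Int.floordiv? s n = some (PySem.Int.floordiv s n) by
    simp [PySem.Int.floordiv?, PySem.Int.floordiv, hn]]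
  set a := PySem.Int.floordiv s n with ha
  set b := PySem.Int.mod s n with hb
  by_cases hlt : a < 1
  · simp [hlt]
  · simp only [hlt, if_false]
    rcases lt_or_gt_of_ne hn with hneg | hpos
    · -- n < 0: A's list is empty, B's loop body never runs; both sides are []
      have hbb := PySem.Int.mod_neg_bounds (a := s) (b := n) hneg
      rw [PySem.List.pyRange_neg_one_eq_nil (by omega)]
      simp only [solLoopA]
      rw [solLoopB, if_neg (by omega)]
      simp [show n.toNat = 0 by omega]
    · -- n > 0: 0 ≤ b < n; both sides are replicate (n-b) a ++ replicate b (a+1)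
      have hb0 : 0 ≤ b := PySem.Int.mod_nonneg s hpos
      have hbn : b < n := PySem.Int.mod_lt s hpos
      have hk : ((n.toNat : Nat) : Int) = n := by omega
      have hbk : ((b.toNat : Nat) : Int) = b := by omega
      -- A side
      have hA := solLoopA_replicate a b.toNat n.toNat [] (by omega)
      rw [hk, hbk] at hA
      simp only [List.append_nil] at hA
      rw [hA]
      -- B side
      have hs : a * n + b = s := by
        have := PySem.Int.floordiv_mul_add_mod s n
        rw [← ha, ← hb] at this; linarith [this]
      have hB := solLoopB_rem n.toNat a b hb0 (by omega) []
      rw [hk] at hB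
      rw [hs] at hB
      simp only [List.nil_append] at hB
      rw [hB]
      have : n.toNat - b.toNat = (n - b).toNat := by omega
      simp [this]

-- ===== VERDICT (by name: the statement is the Claim_ definition above) =====
theorem solution_spec : Claim_equal_solution := by
  intro n s _ hpre
  unfold Spec_solution
  exact solution_eq_alt n s hpre
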